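-- pv_equiv track=rewrite | github.com/m1sterzer0/codejams | old/python/2018/1A/A.py | solve
-- ===== SOURCE A (Python) =====
-- def solve(inp) :
--     (r,c,h,v,board) = inp
--     numCookies = (h+1) * (v+1)
--     rowSums =  [ sum(board[i]) for i in range(r)]
--     colSums =  [ sum([board[x][j] for x in range(r)]) for j in range(c)]
--     totalChips = sum(rowSums)
--     totalCookies = (h+1) * (v+1)
--     chipsPerCookie = totalChips // totalCookies
--     if totalChips != chipsPerCookie * totalCookies : return "IMPOSSIBLE"
--     if totalChips == 0 :                             return "POSSIBLE"
--     chipsPerCookieRow = (v+1) * chipsPerCookie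
--     chipsPerCookieCol = (h+1) * chipsPerCookie
--     hcuts = []; target = chipsPerCookieRow; cumRows = 0
--     for i in range(r) :
--         cumRows += rowSums[i]
--         if cumRows == target :
--             hcuts.append(i)
--             target += chipsPerCookieRow
--     vcuts = []; target = chipsPerCookieCol; cumCols = 0
--     for j in range(c) :
--         cumCols += colSums[j]
--         if cumCols == target :
--             vcuts.append(j)
--             target += chipsPerCookieCol
--     if len(hcuts) != h+1 or len(vcuts) != v+1 : return "IMPOSSIBLE"
--
--     ## Now we have our cuts -- now to check if we have the right cookies
--     cookieCheck = True
--     for i in range(h+1) :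
--         top = 0 if i == 0 else hcuts[i-1]+1
--         bot = hcuts[i]
--         for j in range(v+1) :
--             left = 0 if j == 0 else vcuts[j-1]+1
--             right = vcuts[j]
--             if not checkCookies(board,left,right,top,bot,chipsPerCookie) :
--                 cookieCheck = False
--     return "POSSIBLE" if cookieCheck else "IMPOSSIBLE"
--
-- def checkCookies(board,left,right,top,bot,chipsPerCookie) :
--     numchips = 0
--     for i in range(top,bot+1) :
--         for j in range(left,right+1) :
--             numchips += board[i][j]
--     return chipsPerCookie == numchips
-- ===== SOURCE B (Python) =====
-- def solve(inp):
--     (r, c, h, v, board) = inp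
--     # 2-D prefix-sum table: P[i][j] = sum of board[0..i)[0..j); total kept as a running sum
--     P = [[0] * (c + 1)]
--     total = 0
--     for i in range(r):
--         prev = P[-1]
--         acc = 0
--         row = [0]
--         for j in range(c):
--             acc += board[i][j]
--             row.append(prev[j + 1] + acc)
--         P.append(row)
--         total += acc
--     n = (h + 1) * (v + 1)
--     if total % n != 0:
--         return "IMPOSSIBLE"
--     if total == 0:
--         return "POSSIBLE"
--     q = total // n
--     rowBand = (v + 1) * q
--     colBand = (h + 1) * q
--     # cut detection driven off the prefix table
--     hcuts = []
--     for i in range(r):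
--         if P[i + 1][c] == rowBand * (len(hcuts) + 1):
--             hcuts.append(i)
--     vcuts = []
--     for j in range(c):
--         if P[r][j + 1] == colBand * (len(vcuts) + 1):
--             vcuts.append(j)
--     if len(hcuts) != h + 1 or len(vcuts) != v + 1:
--         return "IMPOSSIBLE"
--     tops = [0] + [i + 1 for i in hcuts]
--     lefts = [0] + [j + 1 for j in vcuts]
--     ok = all(
--         P[tops[i + 1]][lefts[j + 1]] - P[tops[i]][lefts[j + 1]]
--         - P[tops[i + 1]][lefts[j]] + P[tops[i]][lefts[j]] == q
--         for i in range(h + 1) for j in range(v + 1)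
--     )
--     return "POSSIBLE" if ok else "IMPOSSIBLE"
-- ===== Notes on version B (the rewrite author's own statement) =====
-- stated objective: faster
-- what changed: B builds one 2-D prefix-sum table P (P[i][j] = sum of board[0..i)[0..j)) in a single pass and derives the total, both cut scans and every per-cookie rectangle check from P by O(1) lookups, instead of A's separate row/column re-summations and an O(area) re-summation of every cookie rectangle.
-- outside the precondition, e.g. on solve((1, 1, 0, 0, [[1, 2]])): A returns 'IMPOSSIBLE', B returns 'POSSIBLE'; on solve((1, -1, 0, 0, [[5]])): A returns 'IMPOSSIBLE', B returns 'POSSIBLE'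
import Mathlib
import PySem

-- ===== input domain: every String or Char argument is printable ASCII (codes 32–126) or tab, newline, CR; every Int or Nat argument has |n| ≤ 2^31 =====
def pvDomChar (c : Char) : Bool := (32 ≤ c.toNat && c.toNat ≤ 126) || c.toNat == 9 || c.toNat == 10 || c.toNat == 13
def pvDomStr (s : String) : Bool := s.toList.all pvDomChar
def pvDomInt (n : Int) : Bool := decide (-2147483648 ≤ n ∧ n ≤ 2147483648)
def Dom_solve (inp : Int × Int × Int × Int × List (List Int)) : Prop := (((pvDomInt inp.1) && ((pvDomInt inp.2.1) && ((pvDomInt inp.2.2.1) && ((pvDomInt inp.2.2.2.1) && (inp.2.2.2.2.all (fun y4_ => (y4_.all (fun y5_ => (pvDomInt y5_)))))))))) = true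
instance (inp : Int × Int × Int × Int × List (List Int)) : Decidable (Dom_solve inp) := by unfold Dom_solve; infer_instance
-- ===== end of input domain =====

-- B replaces A's repeated row/column/rectangle re-summations by one 2-D prefix-sum table
-- (cut detection and cookie checks read the table in O(1) lookups); objective: faster by
-- mechanism (fewer re-scans); a timing run could not measure it on random inputs.

-- ===== PORT A =====
-- checkCookies(board,left,right,top,bot,chipsPerCookie)
def checkCookies (board : List (List Int)) (left right top bot chipsPerCookie : Int) : Bool :=
  let numchips :=
    (PySem.List.pyRange top (bot + 1) 1).foldl (fun acc i =>
      (PySem.List.pyRange left (right + 1) 1).foldl (fun acc2 j =>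
        acc2 + (PySem.List.pyGetD (PySem.List.pyGetD board i []) j 0)) acc) 0
  chipsPerCookie == numchips

def solve (inp : Int × Int × Int × Int × List (List Int)) : String :=
  match inp with
  | (r, c, h, v, board) =>
    let rowSums := (PySem.List.pyRange 0 r 1).map (fun i => (PySem.List.pyGetD board i []).sum)
    let colSums := (PySem.List.pyRange 0 c 1).map (fun j =>
      ((PySem.List.pyRange 0 r 1).map (fun x => PySem.List.pyGetD (PySem.List.pyGetD board x []) j 0)).sum)
    let totalChips := rowSums.sum
    let totalCookies := (h + 1) * (v + 1)
    let chipsPerCookie := PySem.Int.floordiv totalChips totalCookies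
    if totalChips ≠ chipsPerCookie * totalCookies then "IMPOSSIBLE"
    else if totalChips = 0 then "POSSIBLE"
    else
      let chipsPerCookieRow := (v + 1) * chipsPerCookie
      let chipsPerCookieCol := (h + 1) * chipsPerCookie
      let hSt := (PySem.List.pyRange 0 r 1).foldl
        (fun (st : List Int × Int × Int) i =>
          let cum := st.2.2 + PySem.List.pyGetD rowSums i 0
          if cum = st.2.1 then (st.1 ++ [i], st.2.1 + chipsPerCookieRow, cum)
          else (st.1, st.2.1, cum))
        ([], chipsPerCookieRow, 0)
      let hcuts := hSt.1
      let vSt := (PySem.List.pyRange 0 c 1).foldl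
        (fun (st : List Int × Int × Int) j =>
          let cum := st.2.2 + PySem.List.pyGetD colSums j 0
          if cum = st.2.1 then (st.1 ++ [j], st.2.1 + chipsPerCookieCol, cum)
          else (st.1, st.2.1, cum))
        ([], chipsPerCookieCol, 0)
      let vcuts := vSt.1
      if (hcuts.length : Int) ≠ h + 1 ∨ (vcuts.length : Int) ≠ v + 1 then "IMPOSSIBLE"
      else
        let cookieCheck := (PySem.List.pyRange 0 (h + 1) 1).foldl (fun ck i =>
          let top := if i = 0 then 0 else PySem.List.pyGetD hcuts (i - 1) 0 + 1
          let bot := PySem.List.pyGetD hcuts i 0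
          (PySem.List.pyRange 0 (v + 1) 1).foldl (fun ck2 j =>
            let left := if j = 0 then 0 else PySem.List.pyGetD vcuts (j - 1) 0 + 1
            let right := PySem.List.pyGetD vcuts j 0
            if !(checkCookies board left right top bot chipsPerCookie) then false else ck2) ck)
          true
        if cookieCheck then "POSSIBLE" else "IMPOSSIBLE"

-- ===== PORT B =====
-- inner loop of Source B's table builder: for j in range(c): acc += board[i][j]; row.append(prev[j+1]+acc)
def buildRowB (board : List (List Int)) (prev : List Int) (i c : Int) : Int × List Int :=
  (PySem.List.pyRange 0 c 1).foldl
    (fun (st : Int × List Int) j =>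
      let acc := st.1 + PySem.List.pyGetD (PySem.List.pyGetD board i []) j 0
      (acc, st.2 ++ [PySem.List.pyGetD prev (j + 1) 0 + acc]))
    (0, [0])

-- outer loop: P.append(row built from P[-1]); total += acc
def buildP (board : List (List Int)) (r c : Int) : List (List Int) × Int :=
  (PySem.List.pyRange 0 r 1).foldl
    (fun Pt i =>
      let res := buildRowB board (PySem.List.pyGetD Pt.1 (-1) []) i c
      (Pt.1 ++ [res.2], Pt.2 + res.1))
    ([PySem.List.pyRepeat [0] (c + 1)], 0)

def solve_alt (inp : Int × Int × Int × Int × List (List Int)) : String :=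
  match inp with
  | (r, c, h, v, board) =>
    let Pt := buildP board r c
    let P := Pt.1
    let total := Pt.2
    let n := (h + 1) * (v + 1)
    if PySem.Int.mod total n ≠ 0 then "IMPOSSIBLE"
    else if total = 0 then "POSSIBLE"
    else
      let q := PySem.Int.floordiv total n
      let rowBand := (v + 1) * q
      let colBand := (h + 1) * q
      let hcuts := (PySem.List.pyRange 0 r 1).foldl (fun hc i =>
        if PySem.List.pyGetD (PySem.List.pyGetD P (i + 1) []) c 0 = rowBand * ((hc.length : Int) + 1)
        then hc ++ [i] else hc) []
      let vcuts := (PySem.List.pyRange 0 c 1).foldl (fun vc j =>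
        if PySem.List.pyGetD (PySem.List.pyGetD P r []) (j + 1) 0 = colBand * ((vc.length : Int) + 1)
        then vc ++ [j] else vc) []
      if (hcuts.length : Int) ≠ h + 1 ∨ (vcuts.length : Int) ≠ v + 1 then "IMPOSSIBLE"
      else
        let tops := [0] ++ hcuts.map (· + 1)
        let lefts := [0] ++ vcuts.map (· + 1)
        let ok := (PySem.List.pyRange 0 (h + 1) 1).all (fun i =>
          (PySem.List.pyRange 0 (v + 1) 1).all (fun j =>
            PySem.List.pyGetD (PySem.List.pyGetD P (PySem.List.pyGetD tops (i + 1) 0) []) (PySem.List.pyGetD lefts (j + 1) 0) 0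
            - PySem.List.pyGetD (PySem.List.pyGetD P (PySem.List.pyGetD tops i 0) []) (PySem.List.pyGetD lefts (j + 1) 0) 0
            - PySem.List.pyGetD (PySem.List.pyGetD P (PySem.List.pyGetD tops (i + 1) 0) []) (PySem.List.pyGetD lefts j 0) 0
            + PySem.List.pyGetD (PySem.List.pyGetD P (PySem.List.pyGetD tops i 0) []) (PySem.List.pyGetD lefts j 0) 0
            == q))
        if ok then "POSSIBLE" else "IMPOSSIBLE"

-- ===== PRECONDITION & SPEC =====
-- Pre_ requires (h+1)*(v+1) ≠ 0 (else A raises ZeroDivisionError) and either r ≤ 0 (no board row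
-- is ever read) or a well-formed board of exactly r rows of exactly c ≥ 0 entries.  With r > 0 it
-- excludes mis-sized boards: rows shorter than c make A raise IndexError, and on rows longer than c
-- (or c < 0) A still returns a value but mixes full-row sums with first-c-column sums, an artefact
-- of A's implementation that B does not reproduce.
def Pre_solve (inp : Int × Int × Int × Int × List (List Int)) : Prop :=
  (inp.2.2.1 + 1) * (inp.2.2.2.1 + 1) ≠ 0 ∧
  (inp.1 ≤ 0 ∨
    ((inp.2.2.2.2.length : Int) = inp.1 ∧ 0 ≤ inp.2.1 ∧
     ∀ row ∈ inp.2.2.2.2, (row.length : Int) = inp.2.1))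
instance (inp : Int × Int × Int × Int × List (List Int)) : Decidable (Pre_solve inp) := by
  unfold Pre_solve; infer_instance

def pvWitness_solve : (Int × Int × Int × Int × List (List Int)) :=
  (2, 2, 0, 0, [[1, 0], [0, 1]])

def Spec_solve (inp : Int × Int × Int × Int × List (List Int)) (out : String) : Prop := out = solve_alt inp
instance (inp : Int × Int × Int × Int × List (List Int)) (out : String) : Decidable (Spec_solve inp out) := by
  unfold Spec_solve; infer_instance

-- ===== CLAIM (what is proved, stated in full; the proofs are below) =====
def Claim_equal_solve : Prop := ∀ (inp : Int × Int × Int × Int × List (List Int)), Dom_solve inp → Pre_solve inp → Spec_solve inp (solve inp)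

-- ===== LEMMAS AND PROOFS =====

-- value of cell (x,y) (0 outside), and the 2-D prefix sum S2 bd i j = sum of board[0..i)[0..j)
def valB (bd : List (List Int)) (x y : Nat) : Int := (bd.getD x []).getD y 0

def S2 (bd : List (List Int)) (i j : Nat) : Int :=
  ∑ x ∈ Finset.range i, ∑ y ∈ Finset.range j, valB bd x y

-- common recursive description of both cut-finding loops
def cutsN (F : Nat → Int) (band : Int) : Nat → List Nat
  | 0 => []
  | n + 1 =>
    let p := cutsN F band n
    if F (n + 1) = band * ((p.length : Int) + 1) then p ++ [n] else p

-- common mathematical core both ports reduce to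
def coreSolve (bd : List (List Int)) (C : Nat) (h v : Int) : String :=
  let R := bd.length
  let n := (h + 1) * (v + 1)
  let total := S2 bd R C
  if PySem.Int.mod total n ≠ 0 then "IMPOSSIBLE"
  else if total = 0 then "POSSIBLE"
  else
    let q := PySem.Int.floordiv total n
    let hc := cutsN (fun k => S2 bd k C) ((v + 1) * q) R
    let vc := cutsN (fun k => S2 bd R k) ((h + 1) * q) C
    if (hc.length : Int) ≠ h + 1 ∨ (vc.length : Int) ≠ v + 1 then "IMPOSSIBLE"
    else
      let topv : Nat → Nat := fun ki => if ki = 0 then 0 else hc.getD (ki - 1) 0 + 1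
      let leftv : Nat → Nat := fun kj => if kj = 0 then 0 else vc.getD (kj - 1) 0 + 1
      let ok := (List.range (h + 1).toNat).all (fun ki => (List.range (v + 1).toNat).all (fun kj =>
        q == S2 bd (hc.getD ki 0 + 1) (vc.getD kj 0 + 1)
             - S2 bd (topv ki) (vc.getD kj 0 + 1)
             - S2 bd (hc.getD ki 0 + 1) (leftv kj)
             + S2 bd (topv ki) (leftv kj)))
      if ok then "POSSIBLE" else "IMPOSSIBLE"

-- generic helpers ---------------------------------------------------------

theorem sum_map_range (f : Nat → Int) (n : Nat) :
    ((List.range n).map f).sum = ∑ k ∈ Finset.range n, f k := by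
  induction n with
  | zero => simp
  | succ m ih => rw [List.range_succ, Finset.sum_range_succ]; simp [ih]

theorem foldl_band {a : Type} (l : List a) (b : Bool) (f : a → Bool) :
    l.foldl (fun x i => x && f i) b = (b && l.all f) := by
  induction l generalizing b with
  | nil => simp
  | cons x t ih => simp [ih, Bool.and_assoc]

theorem beq_comm_int (a b : Int) : (a == b) = (b == a) := by
  by_cases h : a = b <;> simp [h, Ne.symm]

theorem getD_map' {a b : Type} (l : List a) (g : a → b) (k : Nat) (d' : a) (d : b)
    (h : k < l.length) : (l.map g).getD k d = g (l.getD k d') := by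
  rw [List.getD_eq_getElem _ _ (by simpa using h), List.getD_eq_getElem _ _ h]
  simp

theorem getD_cast (l : List Nat) (k : Nat) (h : k < l.length) :
    (l.map (fun x : Nat => (x : Int))).getD k 0 = ((l.getD k 0 : Nat) : Int) :=
  getD_map' l (fun x : Nat => (x : Int)) k 0 0 h

theorem sum_take_getD (l : List Int) : ∀ j, j ≤ l.length →
    (l.take j).sum = ∑ y ∈ Finset.range j, l.getD y 0 := by
  intro j
  induction j with
  | zero => simp
  | succ m ih =>
    intro hm
    have hgetm : l.getD m 0 = l[m] := List.getD_eq_getElem _ _ (by omega)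
    rw [Finset.sum_range_succ, ← ih (by omega), hgetm, List.take_add_one,
        List.getElem?_eq_getElem (show m < l.length by omega), List.sum_append]
    simp
    rfl

theorem sum_map_getD {a : Type} (l : List a) (g : a → Int) (d : a) :
    (l.map g).sum = ∑ x ∈ Finset.range l.length, g (l.getD x d) := by
  have : l.map g = (List.range l.length).map (fun x => g (l.getD x d)) := by
    apply List.ext_getElem (by simp)
    intro i h1 h2
    have hi : i < l.length := by simpa using h1
    simp [List.getD_eq_getElem?_getD, List.getElem?_eq_getElem hi]
  rw [this, sum_map_range]

theorem not_any_not {a : Type} (l : List a) (f : a → Bool) :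
    (!(l.any (fun x => !f x))) = l.all f := by
  induction l with
  | nil => simp
  | cons x t ih => by_cases h : f x <;> simp [h, ih]

-- S2 facts -----------------------------------------------------------------

theorem S2_zero_left (bd : List (List Int)) (j : Nat) : S2 bd 0 j = 0 := by simp [S2]

theorem S2_zero_right (bd : List (List Int)) (i : Nat) : S2 bd i 0 = 0 := by simp [S2]

theorem S2_succ_left (bd : List (List Int)) (i j : Nat) :
    S2 bd (i + 1) j = S2 bd i j + ∑ y ∈ Finset.range j, valB bd i y := by
  simp [S2, Finset.sum_range_succ]

theorem S2_succ_right (bd : List (List Int)) (i j : Nat) :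
    S2 bd i (j + 1) = S2 bd i j + ∑ x ∈ Finset.range i, valB bd x j := by
  simp [S2, Finset.sum_range_succ, Finset.sum_add_distrib]

-- the rectangle sum of A's checkCookies, via inclusion–exclusion on S2
theorem rect_sum (bd : List (List Int)) (t b l rg : Nat) (ht : t ≤ b + 1) (hl : l ≤ rg + 1) :
    (PySem.List.pyRange (t : Int) ((b : Int) + 1) 1).foldl (fun acc i =>
       (PySem.List.pyRange (l : Int) ((rg : Int) + 1) 1).foldl (fun acc2 j =>
         acc2 + PySem.List.pyGetD (PySem.List.pyGetD bd i []) j 0) acc) 0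
    = S2 bd (b + 1) (rg + 1) - S2 bd t (rg + 1) - S2 bd (b + 1) l + S2 bd t l := by
  have hbt : (((b:Int) + 1 - (t:Int))).toNat = b + 1 - t := by omega
  have hrl : (((rg:Int) + 1 - (l:Int))).toNat = rg + 1 - l := by omega
  have lhs_eq : (PySem.List.pyRange (t : Int) ((b : Int) + 1) 1).foldl (fun acc i =>
       (PySem.List.pyRange (l : Int) ((rg : Int) + 1) 1).foldl (fun acc2 j =>
         acc2 + PySem.List.pyGetD (PySem.List.pyGetD bd i []) j 0) acc) 0
      = ∑ ki ∈ Finset.range (b + 1 - t), ∑ kj ∈ Finset.range (rg + 1 - l), valB bd (t + ki) (l + kj) := by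
    simp only [PySem.List.foldl_add, zero_add, PySem.List.pyRange_one, List.map_map,
      sum_map_range, hbt, hrl]
    apply Finset.sum_congr rfl
    intro ki _
    apply Finset.sum_congr rfl
    intro kj _
    have h1 : ((t:Int) + (ki:Int)) = ((t + ki : Nat) : Int) := by push_cast; ring
    have h2 : ((l:Int) + (kj:Int)) = ((l + kj : Nat) : Int) := by push_cast; ring
    simp only [Function.comp_apply, h1, h2, PySem.List.pyGetD_natCast]
    rfl
  rw [lhs_eq]
  -- pure Finset identity
  have col : ∀ x : Nat, (∑ y ∈ Finset.range (rg+1), valB bd x y) - (∑ y ∈ Finset.range l, valB bd x y)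
      = ∑ kj ∈ Finset.range (rg + 1 - l), valB bd x (l + kj) := by
    intro x
    rw [← Finset.sum_Ico_eq_sub _ hl, Finset.sum_Ico_eq_sum_range]
  have row : S2 bd (b + 1) (rg + 1) - S2 bd t (rg + 1) - S2 bd (b + 1) l + S2 bd t l
      = ∑ x ∈ Finset.Ico t (b+1), ((∑ y ∈ Finset.range (rg+1), valB bd x y) - (∑ y ∈ Finset.range l, valB bd x y)) := by
    rw [Finset.sum_sub_distrib, Finset.sum_Ico_eq_sub _ ht, Finset.sum_Ico_eq_sub _ ht]
    simp only [S2]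
    ring
  rw [row, Finset.sum_Ico_eq_sum_range]
  apply Finset.sum_congr rfl
  intro ki _
  exact (col (t + ki)).symm

-- cut loops ----------------------------------------------------------------

theorem cutsN_lt (F : Nat → Int) (band : Int) : ∀ n, ∀ x ∈ cutsN F band n, x < n := by
  intro n
  induction n with
  | zero => simp [cutsN]
  | succ m ih =>
    intro x hx
    simp only [cutsN] at hx
    split at hx
    · rcases List.mem_append.1 hx with h | h
      · exact Nat.lt_succ_of_lt (ih x h)
      · simp at h; omega
    · exact Nat.lt_succ_of_lt (ih x hx)

theorem cutsN_pairwise (F : Nat → Int) (band : Int) (n : Nat) :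
    (cutsN F band n).Pairwise (· < ·) := by
  induction n with
  | zero => simp [cutsN]
  | succ m ih =>
    simp only [cutsN]
    split
    · refine List.pairwise_append.2 ⟨ih, List.pairwise_singleton _ _, ?_⟩
      intro x hx y hy
      simp at hy
      subst hy
      exact cutsN_lt F band _ x hx
    · exact ih

theorem cuts_getD_lt (l : List Nat) (hp : l.Pairwise (· < ·)) (a b : Nat)
    (hab : a < b) (hb : b < l.length) : l.getD a 0 < l.getD b 0 := by
  rw [List.getD_eq_getElem _ _ (by omega), List.getD_eq_getElem _ _ hb]
  exact List.pairwise_iff_getElem.1 hp a b (by omega) hb hab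

theorem foldl_cutsA (g : Int → Int) (F : Nat → Int) (band : Int) (hF0 : F 0 = 0)
    (n : Nat) (hg : ∀ k, k < n → g (k : Int) = F (k + 1) - F k) :
    (PySem.List.pyRange 0 (n : Int) 1).foldl
      (fun (st : List Int × Int × Int) i =>
        if st.2.2 + g i = st.2.1 then (st.1 ++ [i], st.2.1 + band, st.2.2 + g i)
        else (st.1, st.2.1, st.2.2 + g i))
      ([], band, 0)
    = ((cutsN F band n).map (fun k : Nat => (k : Int)),
       band * (((cutsN F band n).length : Int) + 1), F n) := by
  rw [PySem.List.pyRange_zero_natCast, List.foldl_map]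
  induction n with
  | zero => simp [cutsN, hF0]
  | succ m ih =>
    rw [List.range_succ, List.foldl_append, ih (fun k hk => hg k (by omega))]
    have hcum : F m + g (m : Int) = F (m + 1) := by rw [hg m (by omega)]; ring
    simp only [List.foldl_cons, List.foldl_nil, hcum]

    by_cases hcond : F (m + 1) = band * (((cutsN F band m).length : Int) + 1)
    · simp [cutsN, hcond, List.map_append]
      ring

    · simp [cutsN, hcond]

theorem foldl_cutsB (Q : Int → Int) (F : Nat → Int) (band : Int) (n : Nat)
    (hQ : ∀ k, k < n → Q (k : Int) = F (k + 1)) :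
    (PySem.List.pyRange 0 (n : Int) 1).foldl
      (fun hc i => if Q i = band * ((hc.length : Int) + 1) then hc ++ [i] else hc) []
    = (cutsN F band n).map (fun k : Nat => (k : Int)) := by
  rw [PySem.List.pyRange_zero_natCast, List.foldl_map]
  induction n with
  | zero => simp [cutsN]
  | succ m ih =>
    rw [List.range_succ, List.foldl_append, ih (fun k hk => hQ k (by omega))]
    simp only [List.foldl_cons, List.foldl_nil, hQ m (by omega)]
    by_cases hcond : F (m + 1) = band * (((cutsN F band m).length : Int) + 1)
    · simp only [List.length_map] at *
      simp [cutsN, hcond]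
    · simp only [List.length_map] at *
      simp [cutsN, hcond]

-- B's prefix table ---------------------------------------------------------

theorem buildRowB_aux (bd : List (List Int)) (i : Nat) (prevf : Nat → Int) (C : Nat)
    (hp0 : prevf 0 = 0) (hlen : (bd.getD i []).length = C) :
    ∀ n, n ≤ C →
    (List.range n).foldl
      (fun (st : Int × List Int) (k : Nat) =>
        let acc := st.1 + PySem.List.pyGetD (PySem.List.pyGetD bd (i : Int) []) (k : Int) 0
        (acc, st.2 ++ [PySem.List.pyGetD ((List.range (C + 1)).map prevf) ((k : Int) + 1) 0 + acc]))
      (0, [0])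
    = (((bd.getD i []).take n).sum,
       (List.range (n + 1)).map (fun j => prevf j + ((bd.getD i []).take j).sum)) := by
  intro n
  induction n with
  | zero => simp [hp0]
  | succ m ih =>
    intro hm
    rw [show List.range (m+1) = List.range m ++ [m] from List.range_succ, List.foldl_append, ih (by omega)]
    simp only [List.foldl_cons, List.foldl_nil]
    have hcast : ((m : Int) + 1) = ((m + 1 : Nat) : Int) := by push_cast; ring
    rw [hcast, PySem.List.pyGetD_natCast, PySem.List.pyGetD_natCast,
        PySem.List.pyGetD_natCast, PySem.List.getD_map_range prevf (C+1) (m+1) 0 (by omega)]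
    have hrow : (bd.getD i []).getD m 0 = (bd.getD i [])[m] := List.getD_eq_getElem _ _ (by omega)
    have hsum : ((bd.getD i []).take (m+1)).sum = ((bd.getD i []).take m).sum + (bd.getD i []).getD m 0 := by
      rw [sum_take_getD _ (m+1) (by omega), sum_take_getD _ m (by omega), Finset.sum_range_succ]
    rw [Prod.mk.injEq]
    refine ⟨by rw [hsum], ?_⟩
    rw [show List.range (m+1+1) = List.range (m+1) ++ [m+1] from List.range_succ, List.map_append]
    simp
    exact hsum.symm

theorem buildRowB_spec (bd : List (List Int)) (i : Nat) (prevf : Nat → Int) (C : Nat)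
    (hp0 : prevf 0 = 0) (hlen : (bd.getD i []).length = C) :
    buildRowB bd ((List.range (C + 1)).map prevf) (i : Int) (C : Int)
    = (((bd.getD i []).take C).sum,
       (List.range (C + 1)).map (fun j => prevf j + ((bd.getD i []).take j).sum)) := by
  rw [buildRowB, PySem.List.pyRange_zero_natCast, List.foldl_map]
  exact buildRowB_aux bd i prevf C hp0 hlen C le_rfl


theorem buildP_spec (bd : List (List Int)) (C : Nat) (hC : ∀ row ∈ bd, row.length = C) :
    buildP bd (bd.length : Int) (C : Int)
    = ((List.range (bd.length + 1)).map (fun i => (List.range (C + 1)).map (fun j => S2 bd i j)),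
       S2 bd bd.length C) := by
  rw [buildP, PySem.List.pyRange_zero_natCast, List.foldl_map]
  have base : ([PySem.List.pyRepeat [(0:Int)] ((C:Int) + 1)] : List (List Int))
      = (List.range (0 + 1)).map (fun i => (List.range (C + 1)).map (fun j => S2 bd i j)) := by
    rw [PySem.List.pyRepeat_singleton]
    have : (((C:Int) + 1)).toNat = C + 1 := by omega
    simp [this, S2_zero_left]
  suffices h : ∀ n, n ≤ bd.length →
      (List.range n).foldl
        (fun (Pt : List (List Int) × Int) (k : Nat) =>
          let res := buildRowB bd (PySem.List.pyGetD Pt.1 (-1) []) (k : Int) (C : Int)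
          (Pt.1 ++ [res.2], Pt.2 + res.1))
        ([PySem.List.pyRepeat [(0:Int)] ((C:Int) + 1)], 0)
      = ((List.range (n + 1)).map (fun i => (List.range (C + 1)).map (fun j => S2 bd i j)),
         S2 bd n C) by
    exact h bd.length le_rfl
  intro n
  induction n with
  | zero =>
    intro _
    simp only [List.range_zero, List.foldl_nil]
    rw [Prod.mk.injEq]
    exact ⟨by simpa using base, (S2_zero_left bd C).symm⟩
  | succ m ih =>
    intro hm
    rw [show List.range (m+1) = List.range m ++ [m] from List.range_succ, List.foldl_append,
        ih (by omega)]
    simp only [List.foldl_cons, List.foldl_nil]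
    have hlast : PySem.List.pyGetD
        ((List.range (m + 1)).map (fun i => (List.range (C + 1)).map (fun j => S2 bd i j))) (-1) []
        = (List.range (C + 1)).map (fun j => S2 bd m j) := by
      rw [show List.range (m+1) = List.range m ++ [m] from List.range_succ, List.map_append]
      exact PySem.List.pyGetD_neg_one_append_singleton _ _ _
    have hrowlen : (bd.getD m []).length = C := by
      rw [List.getD_eq_getElem _ _ hm]; exact hC _ (List.getElem_mem hm)
    rw [hlast, buildRowB_spec bd m (fun j => S2 bd m j) C (S2_zero_right bd m) hrowlen]
    rw [Prod.mk.injEq]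
    constructor
    · rw [show List.range (m+1+1) = List.range (m+1) ++ [m+1] from List.range_succ
            (n := m+1), List.map_append]
      congr 1
      simp only [List.map_cons, List.map_nil]
      congr 1
      apply List.map_congr_left
      intro j hj
      rw [List.mem_range] at hj
      rw [S2_succ_left, sum_take_getD _ j (by omega)]
      rfl
    · rw [S2_succ_left, sum_take_getD _ C (by omega)]
      rfl

-- reduction of the two ports ----------------------------------------------

theorem A_eq_core (bd : List (List Int)) (C : Nat) (h v : Int)
    (hC : ∀ row ∈ bd, row.length = C) :
    solve ((bd.length : Int), (C : Int), h, v, bd) = coreSolve bd C h v := by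
  simp only [solve, coreSolve]
  rw [show (fun i => (PySem.List.pyGetD bd i []).sum)
        = (List.sum ∘ fun i => PySem.List.pyGetD bd i []) from rfl, ← List.map_map,
      PySem.List.map_pyGetD_pyRange_zero']
  have hrowlen : ∀ x, x < bd.length → (bd.getD x []).length = C := by
    intro x hx
    rw [List.getD_eq_getElem _ _ hx]; exact hC _ (List.getElem_mem hx)
  have hrowsum : ∀ x, x < bd.length → (bd.getD x []).sum = ∑ y ∈ Finset.range C, valB bd x y := by
    intro x hx
    rw [show (bd.getD x []).sum = ((bd.getD x []).take (bd.getD x []).length).sum by simp,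
        hrowlen x hx, sum_take_getD _ C (by rw [hrowlen x hx])]
    rfl
  have htot : (bd.map List.sum).sum = S2 bd bd.length C := by
    rw [sum_map_getD bd List.sum []]
    exact Finset.sum_congr rfl (fun x hx => hrowsum x (Finset.mem_range.1 hx))
  rw [htot]
  set n := (h + 1) * (v + 1) with hndef
  set q := PySem.Int.floordiv (S2 bd bd.length C) n with hq
  -- the two cut loops compute cutsN
  have hgrow : ∀ k, k < bd.length →
      PySem.List.pyGetD (bd.map List.sum) (k : Int) 0 = S2 bd (k+1) C - S2 bd k C := by
    intro k hk
    rw [PySem.List.pyGetD_natCast, getD_map' bd List.sum k [] 0 hk, hrowsum k hk, S2_succ_left]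
    ring
  rw [foldl_cutsA (fun i => PySem.List.pyGetD (bd.map List.sum) i 0) (fun k => S2 bd k C)
        ((v + 1) * q) (S2_zero_left bd C) bd.length hgrow]
  have hgcol : ∀ k, k < C →
      PySem.List.pyGetD ((PySem.List.pyRange 0 (C : Int) 1).map (fun j =>
        ((PySem.List.pyRange 0 (bd.length : Int) 1).map (fun x =>
          PySem.List.pyGetD (PySem.List.pyGetD bd x []) j 0)).sum)) (k : Int) 0
      = S2 bd bd.length (k+1) - S2 bd bd.length k := by
    intro k hk
    rw [PySem.List.pyGetD_map_pyRange _ C k 0 hk]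
    rw [show (fun x => PySem.List.pyGetD (PySem.List.pyGetD bd x []) (k : Int) 0)
          = ((fun row => PySem.List.pyGetD row (k : Int) 0) ∘ fun x => PySem.List.pyGetD bd x []) from rfl,
        ← List.map_map, PySem.List.map_pyGetD_pyRange_zero',
        sum_map_getD bd _ [], S2_succ_right]
    simp only [PySem.List.pyGetD_natCast]
    have : ∑ x ∈ Finset.range bd.length, (bd.getD x []).getD k 0
        = ∑ x ∈ Finset.range bd.length, valB bd x k := rfl
    rw [this]; ring
  rw [foldl_cutsA (fun j => PySem.List.pyGetD ((PySem.List.pyRange 0 (C : Int) 1).map (fun j =>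
        ((PySem.List.pyRange 0 (bd.length : Int) 1).map (fun x =>
          PySem.List.pyGetD (PySem.List.pyGetD bd x []) j 0)).sum)) j 0)
        (fun k => S2 bd bd.length k) ((h + 1) * q) (S2_zero_right bd bd.length) C hgcol]
  dsimp only
  simp only [List.length_map]
  have hdiv : q * n + PySem.Int.mod (S2 bd bd.length C) n = S2 bd bd.length C :=
    PySem.Int.floordiv_mul_add_mod _ _
  by_cases h1 : PySem.Int.mod (S2 bd bd.length C) n = 0
  · rw [if_neg (show ¬(S2 bd bd.length C ≠ q * n) by omega),
        if_neg (show ¬(PySem.Int.mod (S2 bd bd.length C) n ≠ 0) by omega)]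
    by_cases h2 : S2 bd bd.length C = 0
    · rw [if_pos h2, if_pos h2]
    · rw [if_neg h2, if_neg h2]
      by_cases h3 : ((cutsN (fun k => S2 bd k C) ((v + 1) * q) bd.length).length : Int) ≠ h + 1 ∨
          ((cutsN (fun k => S2 bd bd.length k) ((h + 1) * q) C).length : Int) ≠ v + 1
      · rw [if_pos h3, if_pos h3]
      · rw [if_neg h3, if_neg h3]
        push Not at h3
        apply if_congr ?_ rfl rfl
        simp only [PySem.List.foldl_if_false_eq, foldl_band, Bool.true_and, not_any_not,
          List.all_eq_true]
        have hlenH : (cutsN (fun k => S2 bd k C) ((v + 1) * q) bd.length).length = (h + 1).toNat := by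
          omega
        have hlenV : (cutsN (fun k => S2 bd bd.length k) ((h + 1) * q) C).length = (v + 1).toNat := by
          omega
        have hpwH := cutsN_pairwise (fun k => S2 bd k C) ((v + 1) * q) bd.length
        have hpwV := cutsN_pairwise (fun k => S2 bd bd.length k) ((h + 1) * q) C
        set hcN := cutsN (fun k => S2 bd k C) ((v + 1) * q) bd.length with hhcN
        set vcN := cutsN (fun k => S2 bd bd.length k) ((h + 1) * q) C with hvcN
        have hpt : ∀ ki kj : Nat, ki < (h + 1).toNat → kj < (v + 1).toNat →
            (checkCookies bd
              (if (kj : Int) = 0 then 0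
                else PySem.List.pyGetD (vcN.map (fun k : Nat => (k : Int))) ((kj : Int) - 1) 0 + 1)
              (PySem.List.pyGetD (vcN.map (fun k : Nat => (k : Int))) (kj : Int) 0)
              (if (ki : Int) = 0 then 0
                else PySem.List.pyGetD (hcN.map (fun k : Nat => (k : Int))) ((ki : Int) - 1) 0 + 1)
              (PySem.List.pyGetD (hcN.map (fun k : Nat => (k : Int))) (ki : Int) 0) q)
            = (q == S2 bd (hcN.getD ki 0 + 1) (vcN.getD kj 0 + 1)
                  - S2 bd (if ki = 0 then 0 else hcN.getD (ki - 1) 0 + 1) (vcN.getD kj 0 + 1)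
                  - S2 bd (hcN.getD ki 0 + 1) (if kj = 0 then 0 else vcN.getD (kj - 1) 0 + 1)
                  + S2 bd (if ki = 0 then 0 else hcN.getD (ki - 1) 0 + 1)
                      (if kj = 0 then 0 else vcN.getD (kj - 1) 0 + 1)) := by
          intro ki kj hki hkj
          have hkiL : ki < hcN.length := by omega
          have hkjL : kj < vcN.length := by omega
          have hbot : PySem.List.pyGetD (hcN.map (fun k : Nat => (k : Int))) (ki : Int) 0
              = ((hcN.getD ki 0 : Nat) : Int) := by
            rw [PySem.List.pyGetD_natCast, getD_cast _ _ hkiL]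
          have hright : PySem.List.pyGetD (vcN.map (fun k : Nat => (k : Int))) (kj : Int) 0
              = ((vcN.getD kj 0 : Nat) : Int) := by
            rw [PySem.List.pyGetD_natCast, getD_cast _ _ hkjL]
          have htop : (if (ki : Int) = 0 then 0
                else PySem.List.pyGetD (hcN.map (fun k : Nat => (k : Int))) ((ki : Int) - 1) 0 + 1)
              = (((if ki = 0 then 0 else hcN.getD (ki - 1) 0 + 1 : Nat)) : Int) := by
            by_cases hki0 : ki = 0
            · simp [hki0]
            · rw [if_neg (by omega), if_neg hki0,
                  show ((ki : Int) - 1) = ((ki - 1 : Nat) : Int) by omega,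
                  PySem.List.pyGetD_natCast, getD_cast _ _ (by omega)]
              push_cast; ring
          have hleft : (if (kj : Int) = 0 then 0
                else PySem.List.pyGetD (vcN.map (fun k : Nat => (k : Int))) ((kj : Int) - 1) 0 + 1)
              = (((if kj = 0 then 0 else vcN.getD (kj - 1) 0 + 1 : Nat)) : Int) := by
            by_cases hkj0 : kj = 0
            · simp [hkj0]
            · rw [if_neg (by omega), if_neg hkj0,
                  show ((kj : Int) - 1) = ((kj - 1 : Nat) : Int) by omega,
                  PySem.List.pyGetD_natCast, getD_cast _ _ (by omega)]
              push_cast; ring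
          rw [hbot, hright, htop, hleft, checkCookies]
          have hT : (if ki = 0 then 0 else hcN.getD (ki - 1) 0 + 1) ≤ hcN.getD ki 0 + 1 := by
            by_cases hki0 : ki = 0
            · simp [hki0]
            · rw [if_neg hki0]
              have := cuts_getD_lt hcN hpwH (ki - 1) ki (by omega) hkiL
              omega
          have hL : (if kj = 0 then 0 else vcN.getD (kj - 1) 0 + 1) ≤ vcN.getD kj 0 + 1 := by
            by_cases hkj0 : kj = 0
            · simp [hkj0]
            · rw [if_neg hkj0]
              have := cuts_getD_lt vcN hpwV (kj - 1) kj (by omega) hkjL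
              omega
          rw [rect_sum bd _ _ _ _ hT hL]
        constructor
        · intro H ki hki kj hkj
          rw [List.mem_range] at hki hkj
          have hmem := H (ki : Int)
            (by rw [PySem.List.mem_pyRange_one]; omega) (kj : Int)
            (by rw [PySem.List.mem_pyRange_one]; omega)
          rw [hpt ki kj hki hkj] at hmem
          exact hmem
        · intro H i hi j hj
          rw [PySem.List.mem_pyRange_one] at hi hj
          have hmem := H i.toNat (by rw [List.mem_range]; omega)
            j.toNat (by rw [List.mem_range]; omega)
          rw [show i = ((i.toNat : Nat) : Int) by omega, show j = ((j.toNat : Nat) : Int) by omega,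
            hpt i.toNat j.toNat (by omega) (by omega)]
          exact hmem
  · rw [if_pos (show S2 bd bd.length C ≠ q * n by omega), if_pos h1]

theorem B_eq_core (bd : List (List Int)) (C : Nat) (h v : Int)
    (hC : ∀ row ∈ bd, row.length = C) :
    solve_alt ((bd.length : Int), (C : Int), h, v, bd) = coreSolve bd C h v := by
  simp only [solve_alt, coreSolve]
  rw [buildP_spec bd C hC]
  dsimp only
  have hP : ∀ X Y : Nat, X ≤ bd.length → Y ≤ C →
      PySem.List.pyGetD (PySem.List.pyGetD
        ((List.range (bd.length + 1)).map (fun i => (List.range (C + 1)).map (fun j => S2 bd i j)))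
        (X : Int) []) (Y : Int) 0 = S2 bd X Y := by
    intro X Y hX hY
    rw [PySem.List.pyGetD_natCast, PySem.List.pyGetD_natCast,
        PySem.List.getD_map_range _ _ _ _ (by omega),
        PySem.List.getD_map_range _ _ _ _ (by omega)]
  set n := (h + 1) * (v + 1) with hndef
  set q := PySem.Int.floordiv (S2 bd bd.length C) n with hq
  by_cases h1 : PySem.Int.mod (S2 bd bd.length C) n = 0
  · rw [if_neg (show ¬(PySem.Int.mod (S2 bd bd.length C) n ≠ 0) by omega),
        if_neg (show ¬(PySem.Int.mod (S2 bd bd.length C) n ≠ 0) by omega)]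
    by_cases h2 : S2 bd bd.length C = 0
    · rw [if_pos h2, if_pos h2]
    · rw [if_neg h2, if_neg h2]
      have hQrow : ∀ k, k < bd.length →
          PySem.List.pyGetD (PySem.List.pyGetD
            ((List.range (bd.length + 1)).map (fun i => (List.range (C + 1)).map (fun j => S2 bd i j)))
            ((k : Int) + 1) []) (C : Int) 0 = S2 bd (k + 1) C := by
        intro k hk
        rw [show ((k : Int) + 1) = (((k + 1 : Nat)) : Int) by push_cast; ring]
        exact hP (k + 1) C (by omega) le_rfl
      rw [foldl_cutsB _ (fun k => S2 bd k C) ((v + 1) * q) bd.length hQrow]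
      have hQcol : ∀ k, k < C →
          PySem.List.pyGetD (PySem.List.pyGetD
            ((List.range (bd.length + 1)).map (fun i => (List.range (C + 1)).map (fun j => S2 bd i j)))
            ((bd.length : Nat) : Int) []) ((k : Int) + 1) 0 = S2 bd bd.length (k + 1) := by
        intro k hk
        rw [show ((k : Int) + 1) = (((k + 1 : Nat)) : Int) by push_cast; ring]
        exact hP bd.length (k + 1) le_rfl (by omega)
      rw [foldl_cutsB _ (fun k => S2 bd bd.length k) ((h + 1) * q) C hQcol]
      simp only [List.length_map]
      by_cases h3 : ((cutsN (fun k => S2 bd k C) ((v + 1) * q) bd.length).length : Int) ≠ h + 1 ∨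
          ((cutsN (fun k => S2 bd bd.length k) ((h + 1) * q) C).length : Int) ≠ v + 1
      · rw [if_pos h3, if_pos h3]
      · rw [if_neg h3, if_neg h3]
        push Not at h3
        apply if_congr ?_ rfl rfl
        simp only [List.all_eq_true]
        have hlenH : (cutsN (fun k => S2 bd k C) ((v + 1) * q) bd.length).length = (h + 1).toNat := by
          omega
        have hlenV : (cutsN (fun k => S2 bd bd.length k) ((h + 1) * q) C).length = (v + 1).toNat := by
          omega
        set hcN := cutsN (fun k => S2 bd k C) ((v + 1) * q) bd.length with hhcN
        set vcN := cutsN (fun k => S2 bd bd.length k) ((h + 1) * q) C with hvcN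
        have hboundH : ∀ ki : Nat, ki < hcN.length → hcN.getD ki 0 < bd.length := by
          intro ki hki
          have hmem : hcN.getD ki 0 ∈ hcN := by
            rw [List.getD_eq_getElem _ _ hki]; exact List.getElem_mem _
          rw [hhcN] at hmem
          exact cutsN_lt _ _ _ _ hmem
        have hboundV : ∀ kj : Nat, kj < vcN.length → vcN.getD kj 0 < C := by
          intro kj hkj
          have hmem : vcN.getD kj 0 ∈ vcN := by
            rw [List.getD_eq_getElem _ _ hkj]; exact List.getElem_mem _
          rw [hvcN] at hmem
          exact cutsN_lt _ _ _ _ hmem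
        have htops1 : ∀ ki : Nat, ki < hcN.length →
            PySem.List.pyGetD ([(0:Int)] ++ (hcN.map (fun k : Nat => (k : Int))).map (· + 1)) ((ki : Int) + 1) 0
            = ((hcN.getD ki 0 + 1 : Nat) : Int) := by
          intro ki hki
          rw [show ((ki : Int) + 1) = (((ki + 1 : Nat)) : Int) by push_cast; ring,
              PySem.List.pyGetD_natCast]
          simp only [List.singleton_append, List.getD_cons_succ]
          rw [getD_map' _ _ ki 0 0 (by simpa using hki), getD_cast _ _ hki]
          push_cast; ring
        have htops0 : ∀ ki : Nat, ki < hcN.length →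
            PySem.List.pyGetD ([(0:Int)] ++ (hcN.map (fun k : Nat => (k : Int))).map (· + 1)) ((ki : Int)) 0
            = (((if ki = 0 then 0 else hcN.getD (ki - 1) 0 + 1 : Nat)) : Int) := by
          intro ki hki
          rw [PySem.List.pyGetD_natCast]
          by_cases hki0 : ki = 0
          · simp [hki0]
          · rw [if_neg hki0, show ki = (ki - 1) + 1 by omega]
            simp only [List.singleton_append, List.getD_cons_succ]
            rw [getD_map' _ _ (ki - 1) 0 0 (by simp; omega), getD_cast _ _ (by omega)]
            push_cast
            ring
        have hlefts1 : ∀ kj : Nat, kj < vcN.length →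
            PySem.List.pyGetD ([(0:Int)] ++ (vcN.map (fun k : Nat => (k : Int))).map (· + 1)) ((kj : Int) + 1) 0
            = ((vcN.getD kj 0 + 1 : Nat) : Int) := by
          intro kj hkj
          rw [show ((kj : Int) + 1) = (((kj + 1 : Nat)) : Int) by push_cast; ring,
              PySem.List.pyGetD_natCast]
          simp only [List.singleton_append, List.getD_cons_succ]
          rw [getD_map' _ _ kj 0 0 (by simpa using hkj), getD_cast _ _ hkj]
          push_cast; ring
        have hlefts0 : ∀ kj : Nat, kj < vcN.length →
            PySem.List.pyGetD ([(0:Int)] ++ (vcN.map (fun k : Nat => (k : Int))).map (· + 1)) ((kj : Int)) 0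
            = (((if kj = 0 then 0 else vcN.getD (kj - 1) 0 + 1 : Nat)) : Int) := by
          intro kj hkj
          rw [PySem.List.pyGetD_natCast]
          by_cases hkj0 : kj = 0
          · simp [hkj0]
          · rw [if_neg hkj0, show kj = (kj - 1) + 1 by omega]
            simp only [List.singleton_append, List.getD_cons_succ]
            rw [getD_map' _ _ (kj - 1) 0 0 (by simp; omega), getD_cast _ _ (by omega)]
            push_cast
            ring
        have hpt : ∀ ki kj : Nat, ki < (h + 1).toNat → kj < (v + 1).toNat →
            ((PySem.List.pyGetD (PySem.List.pyGetD
                ((List.range (bd.length + 1)).map (fun i => (List.range (C + 1)).map (fun j => S2 bd i j)))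
                (PySem.List.pyGetD ([(0:Int)] ++ (hcN.map (fun k : Nat => (k : Int))).map (· + 1)) ((ki : Int) + 1) 0) [])
                (PySem.List.pyGetD ([(0:Int)] ++ (vcN.map (fun k : Nat => (k : Int))).map (· + 1)) ((kj : Int) + 1) 0) 0
              - PySem.List.pyGetD (PySem.List.pyGetD
                ((List.range (bd.length + 1)).map (fun i => (List.range (C + 1)).map (fun j => S2 bd i j)))
                (PySem.List.pyGetD ([(0:Int)] ++ (hcN.map (fun k : Nat => (k : Int))).map (· + 1)) ((ki : Int)) 0) [])
                (PySem.List.pyGetD ([(0:Int)] ++ (vcN.map (fun k : Nat => (k : Int))).map (· + 1)) ((kj : Int) + 1) 0) 0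
              - PySem.List.pyGetD (PySem.List.pyGetD
                ((List.range (bd.length + 1)).map (fun i => (List.range (C + 1)).map (fun j => S2 bd i j)))
                (PySem.List.pyGetD ([(0:Int)] ++ (hcN.map (fun k : Nat => (k : Int))).map (· + 1)) ((ki : Int) + 1) 0) [])
                (PySem.List.pyGetD ([(0:Int)] ++ (vcN.map (fun k : Nat => (k : Int))).map (· + 1)) ((kj : Int)) 0) 0
              + PySem.List.pyGetD (PySem.List.pyGetD
                ((List.range (bd.length + 1)).map (fun i => (List.range (C + 1)).map (fun j => S2 bd i j)))
                (PySem.List.pyGetD ([(0:Int)] ++ (hcN.map (fun k : Nat => (k : Int))).map (· + 1)) ((ki : Int)) 0) [])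
                (PySem.List.pyGetD ([(0:Int)] ++ (vcN.map (fun k : Nat => (k : Int))).map (· + 1)) ((kj : Int)) 0) 0
              == q))
            = (q == S2 bd (hcN.getD ki 0 + 1) (vcN.getD kj 0 + 1)
                  - S2 bd (if ki = 0 then 0 else hcN.getD (ki - 1) 0 + 1) (vcN.getD kj 0 + 1)
                  - S2 bd (hcN.getD ki 0 + 1) (if kj = 0 then 0 else vcN.getD (kj - 1) 0 + 1)
                  + S2 bd (if ki = 0 then 0 else hcN.getD (ki - 1) 0 + 1)
                      (if kj = 0 then 0 else vcN.getD (kj - 1) 0 + 1)) := by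
          intro ki kj hki hkj
          have hkiL : ki < hcN.length := by omega
          have hkjL : kj < vcN.length := by omega
          rw [htops1 ki hkiL, htops0 ki hkiL, hlefts1 kj hkjL, hlefts0 kj hkjL]
          have hTb : (if ki = 0 then 0 else hcN.getD (ki - 1) 0 + 1) ≤ bd.length := by
            by_cases hki0 : ki = 0
            · simp [hki0]
            · rw [if_neg hki0]
              have := hboundH (ki - 1) (by omega)
              omega
          have hLb : (if kj = 0 then 0 else vcN.getD (kj - 1) 0 + 1) ≤ C := by
            by_cases hkj0 : kj = 0
            · simp [hkj0]
            · rw [if_neg hkj0]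
              have := hboundV (kj - 1) (by omega)
              omega
          rw [hP _ _ (by have := hboundH ki hkiL; omega) (by have := hboundV kj hkjL; omega),
              hP _ _ hTb (by have := hboundV kj hkjL; omega),
              hP _ _ (by have := hboundH ki hkiL; omega) hLb,
              hP _ _ hTb hLb]
          exact beq_comm_int _ _
        constructor
        · intro H ki hki kj hkj
          rw [List.mem_range] at hki hkj
          have hmem := H (ki : Int)
            (by rw [PySem.List.mem_pyRange_one]; omega) (kj : Int)
            (by rw [PySem.List.mem_pyRange_one]; omega)
          rw [hpt ki kj hki hkj] at hmem
          exact hmem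
        · intro H i hi j hj
          rw [PySem.List.mem_pyRange_one] at hi hj
          have hmem := H i.toNat (by rw [List.mem_range]; omega)
            j.toNat (by rw [List.mem_range]; omega)
          rw [show i = ((i.toNat : Nat) : Int) by omega, show j = ((j.toNat : Nat) : Int) by omega,
            hpt i.toNat j.toNat (by omega) (by omega)]
          exact hmem
  · rw [if_pos h1, if_pos h1]

-- degenerate case r ≤ 0: neither program reads the board; both return "POSSIBLE"

theorem A_deg (r c h v : Int) (bd : List (List Int)) (hr : r ≤ 0) :
    solve (r, c, h, v, bd) = "POSSIBLE" := by
  have hr0 : (r - 0).toNat = 0 := by omega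
  have h0 : PySem.List.pyRange 0 r 1 = [] := by
    rw [PySem.List.pyRange_one, hr0]
    simp
  have hdiv := PySem.Int.floordiv_mul_add_mod 0 ((h + 1) * (v + 1))
  have hmod : PySem.Int.mod 0 ((h + 1) * (v + 1)) = 0 :=
    (PySem.Int.mod_eq_zero_iff_dvd _ _).2 ⟨0, by ring⟩
  simp only [solve, h0, List.map_nil, List.sum_nil]
  rw [if_neg (by omega)]
  simp

theorem B_deg (r c h v : Int) (bd : List (List Int)) (hr : r ≤ 0) :
    solve_alt (r, c, h, v, bd) = "POSSIBLE" := by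
  have hr0 : (r - 0).toNat = 0 := by omega
  have h0 : PySem.List.pyRange 0 r 1 = [] := by
    rw [PySem.List.pyRange_one, hr0]
    simp
  have hmod : PySem.Int.mod 0 ((h + 1) * (v + 1)) = 0 :=
    (PySem.Int.mod_eq_zero_iff_dvd _ _).2 ⟨0, by ring⟩
  simp only [solve_alt, buildP, h0, List.foldl_nil]
  rw [if_neg (by omega)]
  simp

-- ===== VERDICT (by name: the statement is the Claim_ definition above) =====
theorem solve_spec : Claim_equal_solve := by
  intro inp _ hpre
  obtain ⟨r, c, h, v, bd⟩ := inp
  obtain ⟨-, hcase⟩ := hpre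
  simp only at hcase
  rw [Spec_solve]
  rcases hcase with hr | ⟨h1, hc0, h2⟩
  · rw [A_deg r c h v bd hr, B_deg r c h v bd hr]
  · have hrw : r = (bd.length : Int) := h1.symm
    have hcc : c = ((c.toNat : Nat) : Int) := (Int.toNat_of_nonneg hc0).symm
    subst hrw
    have hC : ∀ row ∈ bd, row.length = c.toNat := fun row hrow => by
      have := h2 row hrow; omega
    rw [hcc, A_eq_core bd c.toNat h v hC, B_eq_core bd c.toNat h v hC]
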